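-- pv_equiv track=rewrite | github.com/kp788778-dot/GG-RHGS | CIVILPRO_TR_TestsToExcel.py | replace_field_density
-- ===== SOURCE A (Python) =====
-- def replace_field_density(methods):
--     count_133 = sum(c for m, c in methods if "WA 133.1" in m)
--     count_134 = sum(c for m, c in methods if "WA 134.1" in m)
--     count_324 = sum(c for m, c in methods if "WA 324.2" in m)
--
--     count_134_combined = count_134 + count_324
--
--     mapping = {
--         (2, 6): "Field Density Package - 6 NDM Sites x 2 MDD",
--         (2, 3): "Field Density Package - 3 NDM Sites x 2 MDD",
--         (3, 3): "Field Density Package - 3 NDM Sites x 3 MDD",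
--         (3, 6): "Field Density Package - 6 NDM Sites x 3 MDD",
--         (3, 9): "Field Density Package - 9 NDM Sites x 3 MDD",
--         (6, 6): "Field Density Package - 6 NDM Sites x 6 MDD"
--     }
--
--     key = (count_133, count_134_combined)
--     if key in mapping:
--         methods = [(m, c) for m, c in methods if "WA 133.1" not in m and "WA 134.1" not in m and "WA 324.2" not in m]
--         methods.append((mapping[key], 1))
--
--     return methods
-- ===== SOURCE B (Python) =====
-- def replace_field_density(methods):
--     c133 = c134 = c324 = 0
--     kept = []
--     for m, c in methods:
--         hit = False
--         if "WA 133.1" in m: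
--             c133 += c
--             hit = True
--         if "WA 134.1" in m:
--             c134 += c
--             hit = True
--         if "WA 324.2" in m:
--             c324 += c
--             hit = True
--         if not hit:
--             kept.append((m, c))
--
--     mapping = {
--         (2, 6): "Field Density Package - 6 NDM Sites x 2 MDD",
--         (2, 3): "Field Density Package - 3 NDM Sites x 2 MDD",
--         (3, 3): "Field Density Package - 3 NDM Sites x 3 MDD",
--         (3, 6): "Field Density Package - 6 NDM Sites x 3 MDD",
--         (3, 9): "Field Density Package - 9 NDM Sites x 3 MDD",
--         (6, 6): "Field Density Package - 6 NDM Sites x 6 MDD"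
--     }
--
--     key = (c133, c134 + c324)
--     if key in mapping:
--         return kept + [(mapping[key], 1)]
--     return methods
-- ===== Notes on version B (the rewrite author's own statement) =====
-- stated objective: alternative
-- what changed: Replaces A's three counting comprehensions plus a separate filtering comprehension (four passes over methods) with a single loop that maintains three counters and the kept list at once.
import Mathlib
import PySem

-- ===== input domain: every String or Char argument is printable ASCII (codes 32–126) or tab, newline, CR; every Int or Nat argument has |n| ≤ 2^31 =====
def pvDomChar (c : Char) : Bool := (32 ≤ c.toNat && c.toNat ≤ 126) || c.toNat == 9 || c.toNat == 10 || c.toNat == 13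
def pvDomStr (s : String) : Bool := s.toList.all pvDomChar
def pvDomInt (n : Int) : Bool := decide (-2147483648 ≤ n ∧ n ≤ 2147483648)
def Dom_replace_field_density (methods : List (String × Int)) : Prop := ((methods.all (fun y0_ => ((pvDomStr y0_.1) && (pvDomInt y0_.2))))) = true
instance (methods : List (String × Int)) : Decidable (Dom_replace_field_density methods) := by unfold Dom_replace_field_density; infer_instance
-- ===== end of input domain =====

-- B merges A's three counting passes and the filtering pass into one loop over `methods`;
-- objective: alternative (single pass; same return value).
-- ===== PORT A =====
def pvMapping : PySem.Dict (Int × Int) String :=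
  PySem.Dict.ofList [
    ((2, 6), "Field Density Package - 6 NDM Sites x 2 MDD"),
    ((2, 3), "Field Density Package - 3 NDM Sites x 2 MDD"),
    ((3, 3), "Field Density Package - 3 NDM Sites x 3 MDD"),
    ((3, 6), "Field Density Package - 6 NDM Sites x 3 MDD"),
    ((3, 9), "Field Density Package - 9 NDM Sites x 3 MDD"),
    ((6, 6), "Field Density Package - 6 NDM Sites x 6 MDD")]

def replace_field_density (methods : List (String × Int)) : List (String × Int) :=
  let count_133 := methods.foldl (fun a p => if PySem.Str.isIn "WA 133.1" p.1 then a + p.2 else a) 0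
  let count_134 := methods.foldl (fun a p => if PySem.Str.isIn "WA 134.1" p.1 then a + p.2 else a) 0
  let count_324 := methods.foldl (fun a p => if PySem.Str.isIn "WA 324.2" p.1 then a + p.2 else a) 0
  let count_134_combined := count_134 + count_324
  let key := (count_133, count_134_combined)
  match pvMapping.get? key with
  | some v =>
      (methods.filter (fun p => !PySem.Str.isIn "WA 133.1" p.1 && !PySem.Str.isIn "WA 134.1" p.1
          && !PySem.Str.isIn "WA 324.2" p.1)) ++ [(v, 1)]
  | none => methods

-- ===== PORT B =====
def pvStep (st : Int × Int × Int × List (String × Int)) (p : String × Int) :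
    Int × Int × Int × List (String × Int) :=
  let h1 := PySem.Str.isIn "WA 133.1" p.1
  let h2 := PySem.Str.isIn "WA 134.1" p.1
  let h3 := PySem.Str.isIn "WA 324.2" p.1
  ((if h1 then st.1 + p.2 else st.1),
   (if h2 then st.2.1 + p.2 else st.2.1),
   (if h3 then st.2.2.1 + p.2 else st.2.2.1),
   (if h1 || h2 || h3 then st.2.2.2 else st.2.2.2 ++ [p]))

def replace_field_density_alt (methods : List (String × Int)) : List (String × Int) :=
  let st := methods.foldl pvStep (0, 0, 0, [])
  let key := (st.1, st.2.1 + st.2.2.1)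
  match pvMapping.get? key with
  | some v => st.2.2.2 ++ [(v, 1)]
  | none => methods

-- ===== PRECONDITION & SPEC =====
def Spec_replace_field_density (methods : List (String × Int)) (out : List (String × Int)) : Prop := out = replace_field_density_alt methods
instance (methods : List (String × Int)) (out : List (String × Int)) : Decidable (Spec_replace_field_density methods out) := by unfold Spec_replace_field_density; infer_instance

-- ===== CLAIM (what is proved, stated in full; the proofs are below) =====
def Claim_equal_replace_field_density : Prop := ∀ (methods : List (String × Int)), Dom_replace_field_density methods → Spec_replace_field_density methods (replace_field_density methods)

-- ===== LEMMAS AND PROOFS =====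

-- ===== VERDICT (by name: the statement is the Claim_ definition above) =====
lemma pvFoldl_state (methods : List (String × Int)) (a b c : Int) (k : List (String × Int)) :
    methods.foldl pvStep (a, b, c, k) =
      (methods.foldl (fun a p => if PySem.Str.isIn "WA 133.1" p.1 then a + p.2 else a) a,
       methods.foldl (fun a p => if PySem.Str.isIn "WA 134.1" p.1 then a + p.2 else a) b,
       methods.foldl (fun a p => if PySem.Str.isIn "WA 324.2" p.1 then a + p.2 else a) c,
       k ++ methods.filter (fun p => !PySem.Str.isIn "WA 133.1" p.1 && !PySem.Str.isIn "WA 134.1" p.1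
          && !PySem.Str.isIn "WA 324.2" p.1)) := by
  induction methods generalizing a b c k with
  | nil => simp
  | cons p ms ih =>
    simp only [List.foldl_cons, List.filter_cons, pvStep]
    by_cases h1 : PySem.Chars.isIn ['W','A',' ','1','3','3','.','1'] p.1.toList <;>
      by_cases h2 : PySem.Chars.isIn ['W','A',' ','1','3','4','.','1'] p.1.toList <;>
      by_cases h3 : PySem.Chars.isIn ['W','A',' ','3','2','4','.','2'] p.1.toList <;>
      simp [h1, h2, h3, ih]

theorem replace_field_density_spec : Claim_equal_replace_field_density := by
  intro methods _
  unfold Spec_replace_field_density replace_field_density replace_field_density_alt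
  rw [pvFoldl_state]
  simp
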